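-- pv_equiv track=rewrite | github.com/brianstark88/prometheus-ultra | api/app.py | is_knowledge_question
-- ===== SOURCE A (Python) =====
-- def is_knowledge_question(goal: str) -> bool:
--     """Detect if this is a knowledge question that doesn't need tools."""
--     knowledge_indicators = [
--         'how many', 'what is', 'what are', 'who is', 'when did', 'where is',
--         'why does', 'explain', 'define', 'what does', 'how does',
--         'stars in the solar system', 'planets in', 'capital of',
--         'who invented', 'when was', 'how tall', 'how old'
--     ]
--
--     goal_lower = goal.lower()
--     return any(indicator in goal_lower for indicator in knowledge_indicators)
-- ===== SOURCE B (Python) =====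
-- _PHRASE_TABLE = (
--     "how many|what is|what are|who is|when did|where is|why does|explain|"
--     "define|what does|how does|stars in the solar system|planets in|"
--     "capital of|who invented|when was|how tall|how old"
-- ).split("|")
--
--
-- def is_knowledge_question(goal: str) -> bool:
--     """Detect if this is a knowledge question that doesn't need tools.
--
--     Single left-to-right scan: at each position of the lowercased goal,
--     test whether any indicator phrase starts there (instead of running a
--     separate substring search per phrase).
--     """
--     g = goal.lower()
--     for i in range(len(g) + 1):
--         if any(g.startswith(p, i) for p in _PHRASE_TABLE):
--             return True
--     return False
-- ===== Notes on version B (the rewrite author's own statement) =====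
-- stated objective: alternative
-- what changed: Replaces the per-phrase substring-membership loop ('indicator in goal_lower' for each of the 18 phrases) by one left-to-right scan over the lowercased goal that at each position tests whether any phrase starts there.
import Mathlib
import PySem

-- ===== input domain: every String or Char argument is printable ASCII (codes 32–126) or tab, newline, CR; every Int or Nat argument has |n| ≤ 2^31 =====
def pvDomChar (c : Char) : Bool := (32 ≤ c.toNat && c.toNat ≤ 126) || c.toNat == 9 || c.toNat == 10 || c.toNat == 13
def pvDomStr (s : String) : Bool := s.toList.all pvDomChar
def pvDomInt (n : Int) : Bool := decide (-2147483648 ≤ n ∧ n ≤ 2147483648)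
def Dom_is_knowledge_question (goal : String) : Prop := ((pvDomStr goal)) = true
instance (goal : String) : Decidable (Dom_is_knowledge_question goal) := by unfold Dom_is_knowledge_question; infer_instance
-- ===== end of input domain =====

-- B replaces A's per-phrase substring-membership loop by a single left-to-right
-- position scan that tests at each position whether any phrase starts there
-- (alternative decomposition; same result, similar cost).


-- ===== PORT A =====
def knowledgeIndicators : List String :=
  ["how many", "what is", "what are", "who is", "when did", "where is",
   "why does", "explain", "define", "what does", "how does",
   "stars in the solar system", "planets in", "capital of",
   "who invented", "when was", "how tall", "how old"]

def is_knowledge_question (goal : String) : Bool :=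
  let goal_lower := PySem.Str.lower goal
  knowledgeIndicators.any (fun indicator => PySem.Str.isIn indicator goal_lower)

-- ===== PORT B =====
def kqPhraseTable : String :=
  "how many|what is|what are|who is|when did|where is|why does|explain|" ++
  "define|what does|how does|stars in the solar system|planets in|" ++
  "capital of|who invented|when was|how tall|how old"

def kqPhrases : List (List Char) :=
  PySem.Chars.splitOn kqPhraseTable.toList "|".toList

-- scan each position (suffix) of the string; at each, test whether some phrase starts there
def kqScan (phrases : List (List Char)) : List Char → Bool
  | [] => phrases.any (fun p => PySem.Chars.startswith [] p)
  | c :: rest =>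
      phrases.any (fun p => PySem.Chars.startswith (c :: rest) p) || kqScan phrases rest

def is_knowledge_question_alt (goal : String) : Bool :=
  kqScan kqPhrases (PySem.Str.lower goal).toList

-- ===== PRECONDITION & SPEC =====
def Spec_is_knowledge_question (goal : String) (out : Bool) : Prop := out = is_knowledge_question_alt goal
instance (goal : String) (out : Bool) : Decidable (Spec_is_knowledge_question goal out) := by unfold Spec_is_knowledge_question; infer_instance

-- ===== CLAIM (what is proved, stated in full; the proofs are below) =====
def Claim_equal_is_knowledge_question : Prop := ∀ (goal : String), Dom_is_knowledge_question goal → Spec_is_knowledge_question goal (is_knowledge_question goal)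

-- ===== LEMMAS AND PROOFS =====

theorem kq_startswith_iff (s p : List Char) :
    PySem.Chars.startswith s p = true ↔ p <+: s := by
  simp [PySem.Chars.startswith]

theorem kqScan_eq_true_iff (phrases : List (List Char)) (s : List Char) :
    kqScan phrases s = true ↔ ∃ p ∈ phrases, p <:+: s := by
  induction s with
  | nil =>
      simp [kqScan, List.any_eq_true, kq_startswith_iff]
  | cons c rest ih =>
      simp only [kqScan, Bool.or_eq_true, List.any_eq_true,
        kq_startswith_iff, ih, List.infix_cons_iff]
      constructor
      · rintro (⟨p, hp, h⟩ | ⟨p, hp, h⟩)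
        · exact ⟨p, hp, Or.inl h⟩
        · exact ⟨p, hp, Or.inr h⟩
      · rintro ⟨p, hp, h | h⟩
        · exact Or.inl ⟨p, hp, h⟩
        · exact Or.inr ⟨p, hp, h⟩

set_option maxRecDepth 4000 in
theorem kqPhrases_eq : kqPhrases = knowledgeIndicators.map String.toList := by decide

-- ===== VERDICT (by name: the statement is the Claim_ definition above) =====
theorem is_knowledge_question_spec : Claim_equal_is_knowledge_question := by
  intro goal _
  unfold Spec_is_knowledge_question
  rw [Bool.eq_iff_iff]
  simp only [is_knowledge_question, is_knowledge_question_alt, kqScan_eq_true_iff,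
    kqPhrases_eq, List.mem_map, List.any_eq_true, PySem.Str.isIn_eq,
    PySem.Chars.isIn_iff_infix]
  constructor
  · rintro ⟨ind, hmem, h⟩
    exact ⟨ind.toList, ⟨ind, hmem, rfl⟩, h⟩
  · rintro ⟨p, ⟨ind, hmem, rfl⟩, h⟩
    exact ⟨ind, hmem, h⟩
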